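-- pv_equiv track=rewrite | github.com/Yaman-Khattab/Course_Scheduling | test.py | CheckRestrictions
-- ===== SOURCE A (Python) =====
-- def CheckRestrictions(genes):
--     sum = 0
--     for i in range(len(genes) - 1):
--         gene1 = genes[i].split(' ')
--         for j in range(i + 1, len(genes)):
--             gene2 = genes[j].split(' ')
--
--             if ((gene2[1] in gene1[1]) or (gene1[1] in gene2[1])) and (gene2[2] == gene1[2]):
--                 sum = sum + 1
--
--             if len(gene1[2]) >= 3:
--                 if gene1[2] == "024":
--                     if "0" == gene2[2] or "2" == gene2[2] or "4" == gene2[2] or "1" == gene2[2] or "3" == gene2[2]: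
--                         sum = sum + 1
--                 if gene1[2] == "6810":
--                     if "6" == gene2[2] or "8" == gene2[2] or "10" == gene2[2] or "5" == gene2[2] or "7" == gene2[2]:
--                         sum = sum + 1
--                 if gene1[2] == "121416":
--                     if "12" == gene2[2] or "14" == gene2[2] or "16" == gene2[2] or "9" == gene2[2] or "11" == gene2[2]:
--                         sum = sum + 1
--
--             if len(gene2[2]) >= 3:
--                 if gene2[2] == "024":
--                     if "0" == gene1[2] or "2" == gene1[2] or "4" == gene1[2] or "1" == gene1[2] or "3" == gene1[2]:
--                         sum = sum + 1
--                 if gene2[2] == "6810":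
--                     if "6" == gene1[2] or "8" == gene1[2] or "10" == gene1[2] or "5" == gene1[2] or "7" == gene1[2]:
--                         sum = sum + 1
--                 if gene2[2] == "121416":
--                     if "12" == gene1[2] or "14" == gene1[2] or "16" == gene1[2] or "9" == gene1[2] or "11" == gene1[2]:
--                         sum = sum + 1
--
--     return sum
-- ===== SOURCE B (Python) =====
-- _CODE_SETS = {
--     "024": ("0", "2", "4", "1", "3"),
--     "6810": ("6", "8", "10", "5", "7"),
--     "121416": ("12", "14", "16", "9", "11"),
-- }
-- _REV = {"0": "024", "2": "024", "4": "024", "1": "024", "3": "024",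
--         "6": "6810", "8": "6810", "10": "6810", "5": "6810", "7": "6810",
--         "12": "121416", "14": "121416", "16": "121416", "9": "121416", "11": "121416"}
--
--
-- def CheckRestrictions(genes):
--     if len(genes) < 2:
--         return 0
--     by_slot = {}
--     total = 0
--     for gene in genes:
--         parts = gene.split(' ')
--         name, slot = parts[1], parts[2]
--         for prev in by_slot.get(slot, []):
--             if name in prev or prev in name:
--                 total += 1
--         if slot in _CODE_SETS:
--             for s in _CODE_SETS[slot]:
--                 total += len(by_slot.get(s, []))
--         if slot in _REV:
--             total += len(by_slot.get(_REV[slot], []))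
--         by_slot.setdefault(slot, []).append(name)
--     return total
-- ===== Notes on version B (the rewrite author's own statement) =====
-- stated objective: alternative
-- what changed: Replaced A's all-pairs O(n^2) double index loop by a single pass that groups gene names by time slot in a dict: substring comparisons run only within the equal-slot group and the '024'/'6810'/'121416' pair rules are counted from group sizes instead of being re-tested per pair.
import Mathlib
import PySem

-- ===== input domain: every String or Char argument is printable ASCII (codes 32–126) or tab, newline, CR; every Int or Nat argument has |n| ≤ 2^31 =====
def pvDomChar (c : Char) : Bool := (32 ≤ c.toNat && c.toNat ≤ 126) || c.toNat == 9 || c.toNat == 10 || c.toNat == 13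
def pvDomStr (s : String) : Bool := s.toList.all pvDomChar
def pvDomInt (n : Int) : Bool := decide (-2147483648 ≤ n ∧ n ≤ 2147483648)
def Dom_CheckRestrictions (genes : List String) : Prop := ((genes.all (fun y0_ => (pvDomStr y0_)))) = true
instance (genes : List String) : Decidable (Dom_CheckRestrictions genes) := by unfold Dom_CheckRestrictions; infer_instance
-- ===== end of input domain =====

set_option maxHeartbeats 1000000


-- B replaces A's all-pairs index loop by a single pass that groups genes by time slot in a dict:
-- substring checks run only within the equal-slot group and the "024"/"6810"/"121416" pair rules are
-- counted from group sizes (objective: alternative decomposition; equivalence of RETURN values proved below).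

-- ===== PORT A =====
-- the "if len(gene1[2]) >= 3: …" block of A, with a = gene1[2], b = gene2[2]
def pvBlockA (a b : String) (sum : Int) : Int :=
  if 3 ≤ PySem.Str.len a then
    let sum := if a == "024" then
        (if "0" == b || "2" == b || "4" == b || "1" == b || "3" == b then sum + 1 else sum)
      else sum
    let sum := if a == "6810" then
        (if "6" == b || "8" == b || "10" == b || "5" == b || "7" == b then sum + 1 else sum)
      else sum
    let sum := if a == "121416" then
        (if "12" == b || "14" == b || "16" == b || "9" == b || "11" == b then sum + 1 else sum)
      else sum
    sum
  else sum

-- body of A's inner loop for one pair (gene1, gene2)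
def pvInnerA (gene1 gene2 : List String) (sum : Int) : Int :=
  let sum := if (PySem.Str.isIn (PySem.List.pyGetD gene2 1 "") (PySem.List.pyGetD gene1 1 "") ||
                 PySem.Str.isIn (PySem.List.pyGetD gene1 1 "") (PySem.List.pyGetD gene2 1 "")) &&
                (PySem.List.pyGetD gene2 2 "" == PySem.List.pyGetD gene1 2 "") then sum + 1 else sum
  let sum := pvBlockA (PySem.List.pyGetD gene1 2 "") (PySem.List.pyGetD gene2 2 "") sum
  let sum := pvBlockA (PySem.List.pyGetD gene2 2 "") (PySem.List.pyGetD gene1 2 "") sum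
  sum

def CheckRestrictions (genes : List String) : Int :=
  (PySem.List.pyRange 0 ((genes.length : Int) - 1) 1).foldl (fun sum i =>
    let gene1 := (PySem.Str.split? (PySem.List.pyGetD genes i "") " ").getD []
    (PySem.List.pyRange (i + 1) (genes.length : Int) 1).foldl (fun sum j =>
      let gene2 := (PySem.Str.split? (PySem.List.pyGetD genes j "") " ").getD []
      pvInnerA gene1 gene2 sum) sum) 0

-- ===== PORT B =====
def pvCodeSets : PySem.Dict String (List String) :=
  PySem.Dict.ofList [("024", ["0", "2", "4", "1", "3"]),
                     ("6810", ["6", "8", "10", "5", "7"]),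
                     ("121416", ["12", "14", "16", "9", "11"])]

def pvRev : PySem.Dict String String :=
  PySem.Dict.ofList [("0", "024"), ("2", "024"), ("4", "024"), ("1", "024"), ("3", "024"),
                     ("6", "6810"), ("8", "6810"), ("10", "6810"), ("5", "6810"), ("7", "6810"),
                     ("12", "121416"), ("14", "121416"), ("16", "121416"), ("9", "121416"), ("11", "121416")]

-- one iteration of B's single pass: state = (by_slot, total)
def pvStepB (st : PySem.Dict String (List String) × Int) (gene : String) :
    PySem.Dict String (List String) × Int :=
  let parts := (PySem.Str.split? gene " ").getD []
  let name := PySem.List.pyGetD parts 1 ""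
  let slot := PySem.List.pyGetD parts 2 ""
  let total := (st.1.getD slot []).foldl
    (fun t prev => if PySem.Str.isIn name prev || PySem.Str.isIn prev name then t + 1 else t) st.2
  let total := if pvCodeSets.contains slot then
      (pvCodeSets.getD slot []).foldl (fun t s => t + ((st.1.getD s []).length : Int)) total
    else total
  let total := if pvRev.contains slot then
      total + ((st.1.getD (pvRev.getD slot "") []).length : Int)
    else total
  (st.1.insert slot ((st.1.getD slot []) ++ [name]), total)

def CheckRestrictions_alt (genes : List String) : Int :=
  if genes.length < 2 then 0
  else (genes.foldl pvStepB (PySem.Dict.empty, 0)).2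

-- ===== PRECONDITION & SPEC =====
-- Pre_ excludes exactly the inputs on which Python A raises IndexError: two or more genes and some
-- gene whose split on ' ' has fewer than 3 fields (A indexes fields 1 and 2 of every gene then).
def Pre_CheckRestrictions (genes : List String) : Prop :=
  genes.length < 2 ∨ ∀ g ∈ genes, 3 ≤ ((PySem.Str.split? g " ").getD []).length
instance (genes : List String) : Decidable (Pre_CheckRestrictions genes) := by
  unfold Pre_CheckRestrictions; infer_instance

def pvWitness_CheckRestrictions : List String := ["c1 a 024", "c2 ab 2", "c3 b 024"]

def Spec_CheckRestrictions (genes : List String) (out : Int) : Prop := out = CheckRestrictions_alt genes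
instance (genes : List String) (out : Int) : Decidable (Spec_CheckRestrictions genes out) := by
  unfold Spec_CheckRestrictions; infer_instance

-- ===== CLAIM (what is proved, stated in full; the proofs are below) =====
def Claim_equal_CheckRestrictions : Prop := ∀ (genes : List String), Dom_CheckRestrictions genes → Pre_CheckRestrictions genes → Spec_CheckRestrictions genes (CheckRestrictions genes)

-- ===== LEMMAS AND PROOFS =====

-- parsed view of a gene: (field 1, field 2) of its split on ' '
def pvQ (parts : List String) : String × String :=
  (PySem.List.pyGetD parts 1 "", PySem.List.pyGetD parts 2 "")
def pvP (g : String) : String × String := pvQ ((PySem.Str.split? g " ").getD [])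

def pvM024 (s : String) : Bool := s == "0" || s == "2" || s == "4" || s == "1" || s == "3"
def pvM6810 (s : String) : Bool := s == "6" || s == "8" || s == "10" || s == "5" || s == "7"
def pvM1216 (s : String) : Bool := s == "12" || s == "14" || s == "16" || s == "9" || s == "11"

def pvCodeS (a b : String) : Int :=
  (if a == "024" then (if pvM024 b then 1 else 0) else 0) +
  (if a == "6810" then (if pvM6810 b then 1 else 0) else 0) +
  (if a == "121416" then (if pvM1216 b then 1 else 0) else 0)

def pvSub (x y : String × String) : Int :=
  if (PySem.Str.isIn y.1 x.1 || PySem.Str.isIn x.1 y.1) && (y.2 == x.2) then 1 else 0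

def pvC (x y : String × String) : Int := pvSub x y + pvCodeS x.2 y.2 + pvCodeS y.2 x.2

def pvPairSum : List (String × String) → Int
  | [] => 0
  | x :: xs => (xs.map (fun y => pvC x y)).sum + pvPairSum xs

def pvDelta : List (String × String) → List String → Int
  | _, [] => 0
  | l, g :: rest => (l.map (fun x => pvC x (pvP g))).sum + pvDelta (l ++ [pvP g]) rest

def pvInv (l : List (String × String)) (d : PySem.Dict String (List String)) : Prop :=
  ∀ s, d.getD s [] = (l.filter (fun x => x.2 == s)).map Prod.fst


lemma pvCodes_lit : pvCodeSets = PySem.Dict.mk [("024", ["0", "2", "4", "1", "3"]),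
    ("6810", ["6", "8", "10", "5", "7"]), ("121416", ["12", "14", "16", "9", "11"])] := by decide

lemma pvRev_lit : pvRev = PySem.Dict.mk [("0", "024"), ("2", "024"), ("4", "024"), ("1", "024"),
    ("3", "024"), ("6", "6810"), ("8", "6810"), ("10", "6810"), ("5", "6810"), ("7", "6810"),
    ("12", "121416"), ("14", "121416"), ("16", "121416"), ("9", "121416"), ("11", "121416")] := by decide

lemma pvContains_codes (t : String) :
    pvCodeSets.contains t = ("024" == t || "6810" == t || "121416" == t) := by
  rw [pvCodes_lit]; simp [Bool.or_assoc]

lemma pvContains_rev (t : String) :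
    pvRev.contains t = (pvM024 t || pvM6810 t || pvM1216 t) := by
  rw [pvRev_lit]; simp [pvM024, pvM6810, pvM1216, Bool.or_assoc, Bool.beq_comm]

lemma pvSub_count (nm t : String) (l : List (String × String)) :
    ((List.countP (fun prev => PySem.Str.isIn nm prev || PySem.Str.isIn prev nm)
      ((l.filter (fun x => x.2 == t)).map Prod.fst) : Int))
    = (l.map (fun x => pvSub x (nm, t))).sum := by
  induction l with
  | nil => simp
  | cons x l ih =>
    simp only [List.filter_cons, List.map_cons, List.sum_cons]
    by_cases hxt : x.2 = t
    · rw [if_pos (show (x.2 == t) = true from by simp [hxt])]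
      simp only [List.map_cons, List.countP_cons]
      push_cast
      rw [ih]
      rw [show pvSub x (nm, t) = if (PySem.Str.isIn nm x.1 || PySem.Str.isIn x.1 nm) then 1 else 0
        from by simp [pvSub, hxt]]
      ring
    · rw [if_neg (show ¬((x.2 == t) = true) from by simp [hxt])]
      rw [ih, show pvSub x (nm, t) = 0 from by
        simp [pvSub, show (t == x.2) = false from by simp [beq_iff_eq]; exact Ne.symm hxt]]
      ring

lemma pvSum_code024 (l : List (String × String)) :
    (l.map (fun x => pvCodeS "024" x.2)).sum
    = (l.countP (fun x => x.2 == "0") : Int) + (l.countP (fun x => x.2 == "2") : Int)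
      + (l.countP (fun x => x.2 == "4") : Int) + (l.countP (fun x => x.2 == "1") : Int)
      + (l.countP (fun x => x.2 == "3") : Int) := by
  induction l with
  | nil => simp
  | cons x l ih =>
    simp only [List.map_cons, List.sum_cons, List.countP_cons, ih]
    have hc : pvCodeS "024" x.2 = if pvM024 x.2 then 1 else 0 := by simp [pvCodeS]
    rw [hc]
    simp only [pvM024, beq_iff_eq]
    by_cases h0 : x.2 = "0" <;> by_cases h2 : x.2 = "2" <;> by_cases h4 : x.2 = "4" <;>
      by_cases h1 : x.2 = "1" <;> by_cases h3 : x.2 = "3" <;> simp_all <;> push_cast <;> omega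

lemma pvSum_code6810 (l : List (String × String)) :
    (l.map (fun x => pvCodeS "6810" x.2)).sum
    = (l.countP (fun x => x.2 == "6") : Int) + (l.countP (fun x => x.2 == "8") : Int)
      + (l.countP (fun x => x.2 == "10") : Int) + (l.countP (fun x => x.2 == "5") : Int)
      + (l.countP (fun x => x.2 == "7") : Int) := by
  induction l with
  | nil => simp
  | cons x l ih =>
    simp only [List.map_cons, List.sum_cons, List.countP_cons, ih]
    have hc : pvCodeS "6810" x.2 = if pvM6810 x.2 then 1 else 0 := by simp [pvCodeS]
    rw [hc]
    simp only [pvM6810, beq_iff_eq]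
    by_cases h0 : x.2 = "6" <;> by_cases h2 : x.2 = "8" <;> by_cases h4 : x.2 = "10" <;>
      by_cases h1 : x.2 = "5" <;> by_cases h3 : x.2 = "7" <;> simp_all <;> push_cast <;> omega

lemma pvSum_code1216 (l : List (String × String)) :
    (l.map (fun x => pvCodeS "121416" x.2)).sum
    = (l.countP (fun x => x.2 == "12") : Int) + (l.countP (fun x => x.2 == "14") : Int)
      + (l.countP (fun x => x.2 == "16") : Int) + (l.countP (fun x => x.2 == "9") : Int)
      + (l.countP (fun x => x.2 == "11") : Int) := by
  induction l with
  | nil => simp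
  | cons x l ih =>
    simp only [List.map_cons, List.sum_cons, List.countP_cons, ih]
    have hc : pvCodeS "121416" x.2 = if pvM1216 x.2 then 1 else 0 := by simp [pvCodeS]
    rw [hc]
    simp only [pvM1216, beq_iff_eq]
    by_cases h0 : x.2 = "12" <;> by_cases h2 : x.2 = "14" <;> by_cases h4 : x.2 = "16" <;>
      by_cases h1 : x.2 = "9" <;> by_cases h3 : x.2 = "11" <;> simp_all <;> push_cast <;> omega

lemma pvCodeS_right_point (C m : String) (hC : C = "024" ∨ C = "6810" ∨ C = "121416")
    (h1 : pvM024 m = (C == "024")) (h2 : pvM6810 m = (C == "6810"))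
    (h3 : pvM1216 m = (C == "121416")) (a : String) :
    pvCodeS a m = if a == C then 1 else 0 := by
  simp only [pvCodeS, h1, h2, h3]
  rcases hC with hC | hC | hC <;> subst hC <;>
    by_cases ha1 : a = "024" <;> by_cases ha2 : a = "6810" <;> by_cases ha3 : a = "121416" <;>
      simp_all

lemma pvCnt_len (d : PySem.Dict String (List String)) (l : List (String × String))
    (h : pvInv l d) (s : String) :
    ((d.getD s []).length : Int) = (l.countP (fun x => x.2 == s) : Int) := by
  rw [h s, List.length_map, List.countP_eq_length_filter]

lemma pvLR_member (C m : String) (hC : C = "024" ∨ C = "6810" ∨ C = "121416")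
    (h1 : pvM024 m = (C == "024")) (h2 : pvM6810 m = (C == "6810"))
    (h3 : pvM1216 m = (C == "121416")) (d : PySem.Dict String (List String))
    (l : List (String × String)) (h : pvInv l d) :
    ((d.getD C []).length : Int) = (l.map (fun x => pvCodeS x.2 m)).sum := by
  rw [pvCnt_len d l h C]
  simp only [pvCodeS_right_point C m hC h1 h2 h3]
  rw [PySem.List.sum_map_ite_one_zero]

lemma pvLC (t : String) (v : Int) (d : PySem.Dict String (List String))
    (l : List (String × String)) (h : pvInv l d) :
    (if ("024" == t || "6810" == t || "121416" == t) then
       (pvCodeSets.getD t []).foldl (fun a s => a + ((d.getD s []).length : Int)) v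
     else v)
    = v + (l.map (fun x => pvCodeS t x.2)).sum := by
  by_cases h1 : t = "024"
  · subst h1
    rw [if_pos (by decide), show pvCodeSets.getD "024" [] = ["0", "2", "4", "1", "3"] from by decide]
    simp only [List.foldl_cons, List.foldl_nil, pvSum_code024,
      pvCnt_len d l h]
    ring
  · by_cases h2 : t = "6810"
    · subst h2
      rw [if_pos (by decide), show pvCodeSets.getD "6810" [] = ["6", "8", "10", "5", "7"] from by decide]
      simp only [List.foldl_cons, List.foldl_nil, pvSum_code6810, pvCnt_len d l h]
      ring
    · by_cases h3 : t = "121416"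
      · subst h3
        rw [if_pos (by decide),
          show pvCodeSets.getD "121416" [] = ["12", "14", "16", "9", "11"] from by decide]
        simp only [List.foldl_cons, List.foldl_nil, pvSum_code1216, pvCnt_len d l h]
        ring
      · rw [if_neg (by simp [beq_iff_eq, Ne.symm h1, Ne.symm h2, Ne.symm h3])]
        have hz : ∀ x ∈ l, pvCodeS t x.2 = 0 := by
          intro x _
          simp [pvCodeS, beq_iff_eq, h1, h2, h3]
        rw [List.map_congr_left (fun x hx => hz x hx)]
        simp

lemma pvLR (t : String) (v : Int) (d : PySem.Dict String (List String))
    (l : List (String × String)) (h : pvInv l d) :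
    (if pvRev.contains t then v + ((d.getD (pvRev.getD t "") []).length : Int) else v)
    = v + (l.map (fun x => pvCodeS x.2 t)).sum := by
  rw [pvContains_rev]
  by_cases hA : pvM024 t = true
  · rw [if_pos (by simp [hA])]
    have := hA
    simp only [pvM024, beq_iff_eq, Bool.or_eq_true, decide_eq_true_eq] at this
    rcases this with ((((h0 | h0) | h0) | h0) | h0) <;> subst h0 <;>
      first
        | rw [show pvRev.getD "0" "" = "024" from by decide,
            pvLR_member "024" "0" (Or.inl rfl) (by decide) (by decide) (by decide) d l h]
        | rw [show pvRev.getD "2" "" = "024" from by decide,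
            pvLR_member "024" "2" (Or.inl rfl) (by decide) (by decide) (by decide) d l h]
        | rw [show pvRev.getD "4" "" = "024" from by decide,
            pvLR_member "024" "4" (Or.inl rfl) (by decide) (by decide) (by decide) d l h]
        | rw [show pvRev.getD "1" "" = "024" from by decide,
            pvLR_member "024" "1" (Or.inl rfl) (by decide) (by decide) (by decide) d l h]
        | rw [show pvRev.getD "3" "" = "024" from by decide,
            pvLR_member "024" "3" (Or.inl rfl) (by decide) (by decide) (by decide) d l h]
  · by_cases hB : pvM6810 t = true
    · rw [if_pos (by simp [hB])]
      have := hB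
      simp only [pvM6810, beq_iff_eq, Bool.or_eq_true, decide_eq_true_eq] at this
      rcases this with ((((h0 | h0) | h0) | h0) | h0) <;> subst h0 <;>
      first
        | rw [show pvRev.getD "6" "" = "6810" from by decide,
            pvLR_member "6810" "6" (Or.inr (Or.inl rfl)) (by decide) (by decide) (by decide) d l h]
        | rw [show pvRev.getD "8" "" = "6810" from by decide,
            pvLR_member "6810" "8" (Or.inr (Or.inl rfl)) (by decide) (by decide) (by decide) d l h]
        | rw [show pvRev.getD "10" "" = "6810" from by decide,
            pvLR_member "6810" "10" (Or.inr (Or.inl rfl)) (by decide) (by decide) (by decide) d l h]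
        | rw [show pvRev.getD "5" "" = "6810" from by decide,
            pvLR_member "6810" "5" (Or.inr (Or.inl rfl)) (by decide) (by decide) (by decide) d l h]
        | rw [show pvRev.getD "7" "" = "6810" from by decide,
            pvLR_member "6810" "7" (Or.inr (Or.inl rfl)) (by decide) (by decide) (by decide) d l h]
    · by_cases hC : pvM1216 t = true
      · rw [if_pos (by simp [hC])]
        have := hC
        simp only [pvM1216, beq_iff_eq, Bool.or_eq_true, decide_eq_true_eq] at this
        rcases this with ((((h0 | h0) | h0) | h0) | h0) <;> subst h0 <;>
      first
        | rw [show pvRev.getD "12" "" = "121416" from by decide,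
            pvLR_member "121416" "12" (Or.inr (Or.inr rfl)) (by decide) (by decide) (by decide) d l h]
        | rw [show pvRev.getD "14" "" = "121416" from by decide,
            pvLR_member "121416" "14" (Or.inr (Or.inr rfl)) (by decide) (by decide) (by decide) d l h]
        | rw [show pvRev.getD "16" "" = "121416" from by decide,
            pvLR_member "121416" "16" (Or.inr (Or.inr rfl)) (by decide) (by decide) (by decide) d l h]
        | rw [show pvRev.getD "9" "" = "121416" from by decide,
            pvLR_member "121416" "9" (Or.inr (Or.inr rfl)) (by decide) (by decide) (by decide) d l h]
        | rw [show pvRev.getD "11" "" = "121416" from by decide,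
            pvLR_member "121416" "11" (Or.inr (Or.inr rfl)) (by decide) (by decide) (by decide) d l h]
      · rw [if_neg (by simp [Bool.eq_false_iff.mpr, hA, hB, hC])]
        have hz : ∀ x ∈ l, pvCodeS x.2 t = 0 := by
          intro x _
          simp only [Bool.not_eq_true] at hA hB hC
          simp [pvCodeS, hA, hB, hC]
        rw [List.map_congr_left (fun x hx => hz x hx)]
        simp

lemma pvC_split (nm t : String) (l : List (String × String)) :
    (l.map (fun x => pvC x (nm, t))).sum
    = (l.map (fun x => pvSub x (nm, t))).sum + (l.map (fun x => pvCodeS x.2 t)).sum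
      + (l.map (fun x => pvCodeS t x.2)).sum := by
  induction l with
  | nil => simp
  | cons x l ih => simp [pvC, ih]; ring

lemma pvBlockA_eq (a b : String) (s : Int) : pvBlockA a b s = s + pvCodeS a b := by
  unfold pvBlockA pvCodeS pvM024 pvM6810 pvM1216
  by_cases h1 : a = "024"
  · subst h1
    rw [if_pos (by decide : (3:Int) ≤ PySem.Str.len "024")]
    simp only [Bool.beq_comm, beq_iff_eq]; norm_num; split_ifs <;> simp_all
  · by_cases h2 : a = "6810"
    · subst h2
      rw [if_pos (by decide : (3:Int) ≤ PySem.Str.len "6810")]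
      simp only [Bool.beq_comm, beq_iff_eq]; norm_num; split_ifs <;> simp_all
    · by_cases h3 : a = "121416"
      · subst h3
        rw [if_pos (by decide : (3:Int) ≤ PySem.Str.len "121416")]
        simp only [Bool.beq_comm, beq_iff_eq]; norm_num; split_ifs <;> simp_all
      · simp only [beq_iff_eq, if_neg h1, if_neg h2, if_neg h3]
        split_ifs <;> omega

lemma pvInnerA_eq (g1 g2 : List String) (s : Int) :
    pvInnerA g1 g2 s = s + pvC (pvQ g1) (pvQ g2) := by
  simp only [pvInnerA, pvC, pvSub, pvQ, pvBlockA_eq]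
  split_ifs <;> omega

lemma pvA_inner (genes : List String) (x : List String) (i : Int) (hi : 0 ≤ i + 1) (sum : Int) :
    (PySem.List.pyRange (i + 1) ((genes.length : Int)) 1).foldl
      (fun s j => pvInnerA x ((PySem.Str.split? (PySem.List.pyGetD genes j "") " ").getD []) s) sum
    = sum + ((genes.drop (i + 1).toNat).map (fun g => pvC (pvQ x) (pvP g))).sum := by
  rw [PySem.List.foldl_pyRange_pyGetD' genes ""
    (fun s v => pvInnerA x ((PySem.Str.split? v " ").getD []) s) sum hi]
  simp only [pvInnerA_eq]
  rw [PySem.List.foldl_add]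
  rfl

lemma pvRange_pairs (genes : List String) :
    ((PySem.List.pyRange 0 ((genes.length : Int) - 1) 1).map (fun i =>
      ((genes.drop (i + 1).toNat).map
        (fun g => pvC (pvP (PySem.List.pyGetD genes i "")) (pvP g))).sum)).sum
    = pvPairSum (genes.map pvP) := by
  induction genes with
  | nil => rw [PySem.List.pyRange_one_eq_nil (by norm_num)]; simp [pvPairSum]
  | cons g gs ih =>
    cases gs with
    | nil =>
      rw [show ((([g] : List String).length : Int) - 1) = 0 from by norm_num,
        PySem.List.pyRange_one_eq_nil le_rfl]
      simp [pvPairSum]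
    | cons g' gs' =>
      have hm : (0:Int) < ((g' :: gs').length : Int) := by exact_mod_cast Nat.succ_pos gs'.length
      rw [show (((g :: g' :: gs').length : Int) - 1) = ((g' :: gs').length : Int) from by
        simp only [List.length_cons]; push_cast; ring]
      rw [PySem.List.pyRange_one_cons (by exact_mod_cast hm)]
      simp only [List.map_cons, List.sum_cons]
      have hhead : (((g :: g' :: gs').drop ((0:Int) + 1).toNat).map
          (fun g2 => pvC (pvP (PySem.List.pyGetD (g :: g' :: gs') 0 "")) (pvP g2))).sum
          = (((g' :: gs').map pvP).map (fun y => pvC (pvP g) y)).sum := by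
        simp only [PySem.List.pyGetD_zero_cons, List.map_map]
        rfl
      have htail : ((PySem.List.pyRange (0 + 1) ((g' :: gs').length : Int) 1).map (fun i =>
          (((g :: g' :: gs').drop (i + 1).toNat).map
            (fun g2 => pvC (pvP (PySem.List.pyGetD (g :: g' :: gs') i "")) (pvP g2))).sum)).sum
          = pvPairSum (List.map pvP (g' :: gs')) := by
        rw [← ih, PySem.List.pyRange_one (0 + 1) ((g' :: gs').length : Int),
          PySem.List.pyRange_one 0 (((g' :: gs').length : Int) - 1),
          List.map_map, List.map_map]
        refine congrArg List.sum ?_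
        rw [show (((g' :: gs').length : Int) - (0 + 1)).toNat
            = (((g' :: gs').length : Int) - 1 - 0).toNat from by omega]
        apply List.map_congr_left
        intro k _
        simp only [Function.comp]
        have h1 : ((0:Int) + 1 + (k : Int)) = ((k + 1 : Nat) : Int) := by push_cast; ring
        have h2 : ((0:Int) + (k : Int)) = ((k : Nat) : Int) := by push_cast; ring
        rw [h1, h2, PySem.List.pyGetD_natCast, PySem.List.pyGetD_natCast]
        rw [show (((k + 1 : Nat) : Int) + 1).toNat = k + 2 from by omega,
          show (((k : Nat) : Int) + 1).toNat = k + 1 from by omega]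
        simp [List.getD]
      rw [hhead, htail]
      simp only [pvPairSum, List.map_cons]

lemma pvA_eq (genes : List String) : CheckRestrictions genes = pvPairSum (genes.map pvP) := by
  unfold CheckRestrictions
  rw [PySem.List.foldl_congr_mem _ _ (fun s i =>
      s + ((genes.drop (i + 1).toNat).map
        (fun g => pvC (pvP (PySem.List.pyGetD genes i "")) (pvP g))).sum) 0
    (fun acc i hi => by
      have h0 : (0:Int) ≤ i := ((PySem.List.mem_pyRange_one).mp hi).1
      exact pvA_inner genes _ i (by omega) acc)]
  rw [PySem.List.foldl_add]
  rw [pvRange_pairs genes]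
  ring

lemma pvPairSum_append (l : List (String × String)) (y : String × String) :
    pvPairSum (l ++ [y]) = pvPairSum l + (l.map (fun x => pvC x y)).sum := by
  induction l with
  | nil => simp [pvPairSum]
  | cons x xs ih => simp [pvPairSum, ih]; ring

lemma pvStepB_val (d : PySem.Dict String (List String)) (acc : Int) (l : List (String × String))
    (h : pvInv l d) (g : String) :
    pvStepB (d, acc) g = (d.insert (pvP g).2 ((d.getD (pvP g).2 []) ++ [(pvP g).1]),
      acc + (l.map (fun x => pvC x (pvP g))).sum) := by
  have hnm : PySem.List.pyGetD ((PySem.Str.split? g " ").getD []) 1 "" = (pvP g).1 := rfl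
  have ht : PySem.List.pyGetD ((PySem.Str.split? g " ").getD []) 2 "" = (pvP g).2 := rfl
  simp only [pvStepB, hnm, ht]
  refine Prod.ext rfl ?_
  simp only [h (pvP g).2, PySem.List.foldl_count_if, pvContains_codes]
  rw [pvSub_count (pvP g).1 (pvP g).2 l]
  rw [pvLC (pvP g).2 _ d l h, pvLR (pvP g).2 _ d l h]
  rw [show pvP g = ((pvP g).1, (pvP g).2) from rfl, pvC_split (pvP g).1 (pvP g).2 l]
  ring

lemma pvInv_step (d : PySem.Dict String (List String)) (l : List (String × String))
    (h : pvInv l d) (y : String × String) :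
    pvInv (l ++ [y]) (d.insert y.2 ((d.getD y.2 []) ++ [y.1])) := by
  intro s
  rw [PySem.Dict.getD_insert, List.filter_append]
  by_cases hs : s = y.2
  · subst hs
    simp [h y.2]
  · rw [if_neg hs, h s]
    simp [beq_iff_eq, Ne.symm hs]

lemma pvB_loop (rest : List String) (d : PySem.Dict String (List String)) (acc : Int)
    (l : List (String × String)) (h : pvInv l d) :
    (rest.foldl pvStepB (d, acc)).2 = acc + pvDelta l rest := by
  induction rest generalizing d acc l with
  | nil => simp [pvDelta]
  | cons g rest ih =>
    simp only [List.foldl_cons, pvStepB_val d acc l h g, pvDelta]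
    rw [ih _ _ (l ++ [pvP g]) (pvInv_step d l h (pvP g))]
    ring

lemma pvDelta_pairSum (rest : List String) (l : List (String × String)) :
    pvPairSum l + pvDelta l rest = pvPairSum (l ++ rest.map pvP) := by
  induction rest generalizing l with
  | nil => simp [pvDelta]
  | cons g rest ih =>
    have := ih (l ++ [pvP g])
    simp only [pvDelta, List.map_cons]
    rw [← add_assoc, ← pvPairSum_append, this]
    simp

-- ===== VERDICT (by name: the statement is the Claim_ definition above) =====
theorem CheckRestrictions_spec : Claim_equal_CheckRestrictions := by
  intro genes _ _
  unfold Spec_CheckRestrictions CheckRestrictions_alt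
  rw [pvA_eq]
  by_cases hlen : genes.length < 2
  · simp only [hlen, if_true]
    match genes, hlen with
    | [], _ => rfl
    | [g], _ => simp [pvPairSum]
  · simp only [hlen, if_false]
    rw [pvB_loop genes PySem.Dict.empty 0 [] (fun s => by simp [PySem.Dict.getD_empty])]
    have h := pvDelta_pairSum genes []
    simp only [pvPairSum, List.nil_append, zero_add] at h
    omega
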